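-- pv_equiv track=rewrite | github.com/janjegit/pyalgorithm | heap_postions.py | prev_pos
-- ===== SOURCE A (Python) =====
-- def prev_pos(path):
--     result=''
--     if len(path)>0:
--         i=len(path)-1
--         while i>=0 and path[i]!='r':
--             result='r'+result
--             i=i-1
--         if i<0:
--             result=result[1:]
--         else:
--             result=path[:i]+'l'+result
--     return result
-- ===== SOURCE B (Python) =====
-- def prev_pos(path):
--     idx = path.rfind('r')
--     if idx == -1:
--         return 'r' * (len(path) - 1)
--     return path[:idx] + 'l' + 'r' * (len(path) - 1 - idx)
-- ===== Notes on version B (the rewrite author's own statement) =====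
-- stated objective: faster
-- what changed: Replaces the backward character-by-character while loop that prepends one character per step (quadratic string rebuilding) with a single rfind to locate the rightmost matching character and a closed-form slice-plus-repeat construction, with the not-found case unified into the same repeat formula.
import Mathlib
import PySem

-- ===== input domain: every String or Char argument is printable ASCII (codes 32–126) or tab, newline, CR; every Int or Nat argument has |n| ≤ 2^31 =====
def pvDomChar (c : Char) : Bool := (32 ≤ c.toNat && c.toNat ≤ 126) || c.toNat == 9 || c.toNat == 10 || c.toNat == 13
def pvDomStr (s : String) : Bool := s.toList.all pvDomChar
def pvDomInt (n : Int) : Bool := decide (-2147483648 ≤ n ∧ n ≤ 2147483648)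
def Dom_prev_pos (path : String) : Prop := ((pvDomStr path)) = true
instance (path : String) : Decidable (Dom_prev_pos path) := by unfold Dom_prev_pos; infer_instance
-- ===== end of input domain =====

-- B replaces A's backward while-loop (which prepends 'r' one at a time) by rfind('r') and a closed-form build; objective: simpler.

-- ===== PORT A =====
-- A's while loop: i runs down from len-1 while path[i] ≠ 'r', prepending 'r' to result.
-- Returns (some i, result) if it stopped at an 'r', (none, result) if i went below 0.
def prevPosLoopA (cs : List Char) : Nat → List Char → Option Nat × List Char
  | i, res =>
    if (cs[i]?.getD 'r') ≠ 'r' then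
      match i with
      | 0 => (none, 'r' :: res)
      | i + 1 => prevPosLoopA cs i ('r' :: res)
    else (some i, res)

def prev_pos (path : String) : String :=
  let cs := path.toList
  if cs.length > 0 then
    match prevPosLoopA cs (cs.length - 1) [] with
    | (none, res) => String.mk res.tail          -- result = result[1:]
    | (some i, res) => String.mk (cs.take i ++ 'l' :: res)  -- path[:i] + 'l' + result
  else ""

-- ===== PORT B =====
-- idx = path.rfind('r'); found via findIdx? on the reversed list: j chars from the end, idx = len-1-j
def prev_pos_alt (path : String) : String :=
  let cs := path.toList
  match cs.reverse.findIdx? (· == 'r') with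
  | none => String.mk (List.replicate (cs.length - 1) 'r')
  | some j => String.mk (cs.take (cs.length - 1 - j) ++ 'l' :: List.replicate j 'r')

-- ===== PRECONDITION & SPEC =====
def Spec_prev_pos (path : String) (out : String) : Prop := out = prev_pos_alt path
instance (path : String) (out : String) : Decidable (Spec_prev_pos path out) := by unfold Spec_prev_pos; infer_instance

-- ===== CLAIM (what is proved, stated in full; the proofs are below) =====
def Claim_equal_prev_pos : Prop := ∀ (path : String), Dom_prev_pos path → Spec_prev_pos path (prev_pos path)

-- ===== LEMMAS AND PROOFS =====

lemma repl_cons_append (j : Nat) (c : Char) (res : List Char) :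
    List.replicate j c ++ c :: res = List.replicate (j+1) c ++ res := by
  rw [List.replicate_succ' (n := j)]; simp

-- characterisation of A's loop in terms of findIdx? on the reversed prefix
lemma prevPosLoopA_eq (cs : List Char) (i : Nat) (res : List Char) (hi : i < cs.length) :
    prevPosLoopA cs i res =
      match (cs.take (i+1)).reverse.findIdx? (· == 'r') with
      | none => (none, List.replicate (i+1) 'r' ++ res)
      | some j => (some (i - j), List.replicate j 'r' ++ res) := by
  induction i generalizing res with
  | zero =>
    rw [prevPosLoopA]
    have h0 : cs.take 1 = [cs[0]] := by
      cases cs with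
      | nil => simp at hi
      | cons a l => simp
    by_cases h : cs[0] = 'r'
    · simp [h0, h, List.findIdx?_cons, List.getElem?_eq_getElem hi]
    · simp [h0, h, List.findIdx?_cons, List.getElem?_eq_getElem hi]
  | succ i ih =>
    rw [prevPosLoopA]
    have hlt : i + 1 < cs.length := hi
    have htk : cs.take (i+2) = cs.take (i+1) ++ [cs[i+1]] := by
      rw [List.take_add_one, List.getElem?_eq_getElem hlt]; simp
    by_cases h : cs[i+1] = 'r'
    · simp [htk, h, List.findIdx?_cons, List.getElem?_eq_getElem hlt]
    · have hb : (cs[i+1] == 'r') = false := by simp [h]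
      have hfi : ((cs.take (i+2)).reverse).findIdx? (· == 'r')
          = (((cs.take (i+1)).reverse).findIdx? (· == 'r')).map (· + 1) := by
        rw [htk, List.reverse_append]
        simp [List.findIdx?_cons, hb]
      rw [ih ('r' :: res) (by omega)]
      rw [hfi]
      simp only [List.getElem?_eq_getElem hlt, Option.getD_some, ne_eq, h,
        not_false_eq_true, if_true]
      cases (cs.take (i+1)).reverse.findIdx? (· == 'r') with
      | none => simp [repl_cons_append]
      | some j =>
        simp only [Option.map_some]
        refine Prod.ext ?_ ?_
        · simp
        · simp [repl_cons_append]

-- ===== VERDICT (by name: the statement is the Claim_ definition above) =====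
theorem prev_pos_spec : Claim_equal_prev_pos := by
  intro path _
  unfold Spec_prev_pos prev_pos prev_pos_alt
  cases hcs : path.toList with
  | nil => simp; rfl
  | cons a l =>
    simp only [List.length_cons, Nat.add_sub_cancel, gt_iff_lt, Nat.succ_pos, if_true]
    rw [prevPosLoopA_eq (a :: l) l.length [] (by simp)]
    have htake : (a :: l).take (l.length + 1) = a :: l := by simp
    rw [htake]
    cases h : (a :: l).reverse.findIdx? (· == 'r') with
    | none => simp [List.replicate_succ]
    | some j => simp
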